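-- pv_equiv track=rewrite | github.com/ElizabethViera/AdventOfCode | AdventOfCode2022/Day 19/Day19.py | calculateMaxMaterials
-- ===== SOURCE A (Python) =====
-- def calculateMaxMaterials(blueprint):
--     materials = {}
--     for robot in blueprint:
--         for material in blueprint[robot]:
--             if material not in materials:
--                 materials[material] = blueprint[robot][material]
--             else:
--                 if blueprint[robot][material] > materials[material]:
--                     materials[material] = blueprint[robot][material]
--     return materials
-- ===== SOURCE B (Python) =====
-- def calculateMaxMaterials(blueprint):
--     keys = dict.fromkeys(m for r in blueprint for m in blueprint[r])
--     return {m: max(blueprint[r][m] for r in blueprint if m in blueprint[r])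
--             for m in keys}
-- ===== Notes on version B (the rewrite author's own statement) =====
-- stated objective: idiomatic
-- what changed: A builds the result in one pass keeping a running maximum per material; B first collects the set of material keys across all robots (dict.fromkeys) and then builds the result as a dict comprehension with a per-key max reduction over the robots; Pre_ only excludes association lists with duplicate outer or inner keys, which do not represent Python dicts.
import Mathlib
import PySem

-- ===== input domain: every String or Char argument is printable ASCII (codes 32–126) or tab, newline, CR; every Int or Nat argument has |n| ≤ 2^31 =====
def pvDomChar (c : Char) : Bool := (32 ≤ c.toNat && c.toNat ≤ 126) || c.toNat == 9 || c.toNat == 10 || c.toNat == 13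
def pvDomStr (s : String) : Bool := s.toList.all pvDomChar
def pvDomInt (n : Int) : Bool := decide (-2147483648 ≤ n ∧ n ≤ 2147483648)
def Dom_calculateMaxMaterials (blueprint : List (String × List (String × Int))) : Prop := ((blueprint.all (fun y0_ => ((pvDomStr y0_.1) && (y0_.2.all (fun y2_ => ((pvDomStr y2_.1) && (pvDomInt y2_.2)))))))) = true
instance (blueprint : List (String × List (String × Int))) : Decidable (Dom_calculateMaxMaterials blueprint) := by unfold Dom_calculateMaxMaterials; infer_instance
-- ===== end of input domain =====

-- B replaces A's single-pass running-maximum dict accumulation with a two-phase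
-- key-collection (dict.fromkeys) followed by a per-key max reduction over the robots
-- (objective: idiomatic; same asymptotic cost is NOT claimed to be lower).

-- ===== PORT A =====
def calculateMaxMaterials (blueprint : List (String × List (String × Int))) : List (String × Int) :=
  -- materials = {}; for robot in blueprint: for material in blueprint[robot]: …
  let bp : PySem.Dict String (List (String × Int)) := PySem.Dict.mk blueprint
  (List.foldl
    (fun (materials : PySem.Dict String Int) rp =>
      let robotBp := (bp.get? rp.1).getD []              -- blueprint[robot] (present: robot iterates blueprint's keys)
      List.foldl
        (fun (materials : PySem.Dict String Int) mp =>
          let v := ((PySem.Dict.mk robotBp).get? mp.1).getD 0   -- blueprint[robot][material] (present)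
          if materials.contains mp.1 = false then materials.insert mp.1 v
          else if v > materials.getD mp.1 0 then materials.insert mp.1 v
          else materials)
        materials robotBp)
    PySem.Dict.empty blueprint).items

-- ===== PORT B =====
def calculateMaxMaterials_alt (blueprint : List (String × List (String × Int))) : List (String × Int) :=
  let bp : PySem.Dict String (List (String × Int)) := PySem.Dict.mk blueprint
  -- keys = dict.fromkeys(m for r in blueprint for m in blueprint[r])
  let keys := PySem.List.dedup (blueprint.flatMap (fun rp => ((bp.get? rp.1).getD []).map Prod.fst))
  -- {m: max(blueprint[r][m] for r in blueprint if m in blueprint[r]) for m in keys}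
  keys.map (fun m =>
    (m, (PySem.List.max?
          ((blueprint.filter (fun rp => (PySem.Dict.mk ((bp.get? rp.1).getD [])).contains m)).map
            (fun rp => ((PySem.Dict.mk ((bp.get? rp.1).getD [])).get? m).getD 0))
          (fun v => v)).getD 0))   -- getD 0 is unreachable: m came from keys, so the list is nonempty

-- ===== PRECONDITION & SPEC =====
-- Pre_ excludes association lists with duplicate outer keys or duplicate keys inside a robot's
-- cost list: such lists do not represent Python dicts (the dict-typed argument always satisfies Pre_).
def Pre_calculateMaxMaterials (blueprint : List (String × List (String × Int))) : Prop :=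
  (blueprint.map Prod.fst).Nodup ∧ ∀ rp ∈ blueprint, (rp.2.map Prod.fst).Nodup
instance (blueprint : List (String × List (String × Int))) : Decidable (Pre_calculateMaxMaterials blueprint) := by
  unfold Pre_calculateMaxMaterials; infer_instance
def pvWitness_calculateMaxMaterials : (List (String × List (String × Int))) :=
  [("ore_robot", [("ore", 4)]), ("clay_robot", [("ore", 2), ("clay", 14)])]

def Spec_calculateMaxMaterials (blueprint : List (String × List (String × Int))) (out : List (String × Int)) : Prop := out = calculateMaxMaterials_alt blueprint
instance (blueprint : List (String × List (String × Int))) (out : List (String × Int)) : Decidable (Spec_calculateMaxMaterials blueprint out) := by unfold Spec_calculateMaxMaterials; infer_instance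

-- ===== CLAIM (what is proved, stated in full; the proofs are below) =====
def Claim_equal_calculateMaxMaterials : Prop := ∀ (blueprint : List (String × List (String × Int))), Dom_calculateMaxMaterials blueprint → Pre_calculateMaxMaterials blueprint → Spec_calculateMaxMaterials blueprint (calculateMaxMaterials blueprint)

-- ===== LEMMAS AND PROOFS =====

-- the body of A's inner loop, on a pair whose lookups have been resolved
def pvUpd (d : PySem.Dict String Int) (mp : String × Int) : PySem.Dict String Int :=
  if d.contains mp.1 = false then d.insert mp.1 mp.2
  else if mp.2 > d.getD mp.1 0 then d.insert mp.1 mp.2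
  else d

-- the values carried by key m in a flat (material, cost) pair list
def pvCands (m : String) (ps : List (String × Int)) : List Int :=
  (ps.filter (fun p => p.1 == m)).map Prod.snd

def pvMx (m : String) (ps : List (String × Int)) : Int :=
  ((PySem.List.max? (pvCands m ps) (fun v => v)).getD 0)

-- the common normal form of both programs on the flattened pair list
def pvModel (ps : List (String × Int)) : List (String × Int) :=
  (PySem.List.dedup (ps.map Prod.fst)).map (fun m => (m, pvMx m ps))

theorem pvModel_keys (ps : List (String × Int)) :
    (pvModel ps).map Prod.fst = PySem.List.dedup (ps.map Prod.fst) := by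
  simp only [pvModel, List.map_map]
  rw [show (Prod.fst ∘ fun m => (m, pvMx m ps)) = id from rfl, List.map_id]

theorem pvDedup_append {α : Type} [BEq α] [LawfulBEq α] (xs : List α) (x : α) :
    PySem.List.dedup (xs ++ [x])
      = if x ∈ xs then PySem.List.dedup xs else PySem.List.dedup xs ++ [x] := by
  rw [PySem.List.dedup_eq_ofList, PySem.List.dedup_eq_ofList, PySem.Set.ofList_eq_foldl,
    List.foldl_append, ← PySem.Set.ofList_eq_foldl, List.foldl_cons, List.foldl_nil]
  by_cases hx : x ∈ xs
  · simp [PySem.Set.add, hx]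
  · simp [PySem.Set.add, hx]

theorem pvCands_append (m : String) (xs ys : List (String × Int)) :
    pvCands m (xs ++ ys) = pvCands m xs ++ pvCands m ys := by
  simp [pvCands, List.filter_append]

theorem pvCands_singleton (m : String) (p : String × Int) :
    pvCands m [p] = if p.1 = m then [p.2] else [] := by
  by_cases hp : p.1 = m <;> simp [pvCands, hp]

theorem pvCands_eq_nil (m : String) (ps : List (String × Int)) (h : m ∉ ps.map Prod.fst) :
    pvCands m ps = [] := by
  simp only [pvCands, List.map_eq_nil_iff, List.filter_eq_nil_iff]
  intro p hp hpm
  exact h ((by simpa using hpm : p.1 = m) ▸ List.mem_map_of_mem hp)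

theorem pvCands_ne_nil (m : String) (ps : List (String × Int)) (h : m ∈ ps.map Prod.fst) :
    pvCands m ps ≠ [] := by
  obtain ⟨p, hp, hpm⟩ := List.mem_map.mp h
  intro hnil
  have : p.2 ∈ pvCands m ps := by
    simp only [pvCands, List.mem_map]
    exact ⟨p, List.mem_filter.mpr ⟨hp, by simp [hpm]⟩, rfl⟩
  simp [hnil] at this

theorem pvMaxD_append (xs : List Int) (v : Int) :
    (PySem.List.max? (xs ++ [v]) (fun y => y)).getD 0
      = if xs = [] then v else max ((PySem.List.max? xs (fun y => y)).getD 0) v := by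
  cases xs with
  | nil => simp [PySem.List.max?_id_cons]
  | cons x t =>
    rw [List.cons_append, PySem.List.max?_id_cons, PySem.List.max?_id_cons]
    simp [List.foldl_append]

theorem pvMx_append_ne (m : String) (ps : List (String × Int)) (p : String × Int) (hne : p.1 ≠ m) :
    pvMx m (ps ++ [p]) = pvMx m ps := by
  simp [pvMx, pvCands_append, pvCands_singleton, hne]

theorem pvMx_append_self (m : String) (ps : List (String × Int)) (v : Int) :
    pvMx m (ps ++ [(m, v)]) = if m ∈ ps.map Prod.fst then max (pvMx m ps) v else v := by
  have hcand : pvCands m (ps ++ [(m, v)]) = pvCands m ps ++ [v] := by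
    rw [pvCands_append, pvCands_singleton]; simp
  rw [pvMx, hcand, pvMaxD_append]
  by_cases hm : m ∈ ps.map Prod.fst
  · rw [if_pos hm, if_neg (pvCands_ne_nil m ps hm)]; rfl
  · rw [if_neg hm, if_pos (pvCands_eq_nil m ps hm)]

theorem pvFold_eq_model (ps : List (String × Int)) :
    List.foldl pvUpd PySem.Dict.empty ps = PySem.Dict.mk (pvModel ps) := by
  induction ps using List.reverseRecOn with
  | nil => rfl
  | append_singleton ps p ih =>
    rw [List.foldl_append, List.foldl_cons, List.foldl_nil, ih]
    obtain ⟨m, v⟩ := p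
    apply PySem.Dict.ext
    have hkeysmk : (PySem.Dict.mk (pvModel ps)).keys = PySem.List.dedup (ps.map Prod.fst) :=
      pvModel_keys ps
    by_cases hm : m ∈ ps.map Prod.fst
    · have hcont : (PySem.Dict.mk (pvModel ps)).contains m = true := by
        rw [PySem.Dict.contains_iff_mem_keys, hkeysmk, PySem.List.mem_dedup]; exact hm
      have hnd : (PySem.Dict.mk (pvModel ps)).keys.Nodup := by
        rw [hkeysmk]; exact PySem.List.nodup_dedup _
      have hmemmodel : (m, pvMx m ps) ∈ pvModel ps :=
        List.mem_map_of_mem ((PySem.List.mem_dedup _ _).mpr hm)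
      have hcur : (PySem.Dict.mk (pvModel ps)).getD m 0 = pvMx m ps :=
        PySem.Dict.getD_of_mem_items _ hmemmodel hnd 0
      have hded : PySem.List.dedup ((ps ++ [(m, v)]).map Prod.fst)
          = PySem.List.dedup (ps.map Prod.fst) := by
        rw [List.map_append, List.map_cons, List.map_nil, pvDedup_append, if_pos hm]
      unfold pvUpd
      simp only [hcont, hcur]
      by_cases hgt : v > pvMx m ps
      · rw [if_neg (by simp), if_pos hgt]
        rw [PySem.Dict.items_insert_of_contains _ _ hcont]
        show (pvModel ps).map _ = pvModel (ps ++ [(m, v)])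
        unfold pvModel
        rw [hded, List.map_map]
        apply List.map_congr_left
        intro k hk
        by_cases hkm : k = m
        · subst hkm
          simp [Function.comp, pvMx_append_self, hm, max_eq_right (le_of_lt hgt)]
        · have hne : (m, v).1 ≠ k := fun hh => hkm hh.symm
          have hbk : (k == m) = false := beq_eq_false_iff_ne.mpr hkm
          simp [Function.comp, hbk, pvMx_append_ne k ps (m, v) hne]
      · rw [if_neg (by simp), if_neg hgt]
        show pvModel ps = pvModel (ps ++ [(m, v)])
        unfold pvModel
        rw [hded]
        apply List.map_congr_left
        intro k hk
        by_cases hkm : k = m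
        · subst hkm
          rw [pvMx_append_self, if_pos hm, max_eq_left (not_lt.mp hgt)]
        · have hne : (m, v).1 ≠ k := fun hh => hkm hh.symm
          rw [pvMx_append_ne k ps (m, v) hne]
    · have hmemk : ¬ m ∈ (PySem.Dict.mk (pvModel ps)).keys := by
        rw [hkeysmk, PySem.List.mem_dedup]; exact hm
      have hcont : (PySem.Dict.mk (pvModel ps)).contains m = false := by
        cases hcc : (PySem.Dict.mk (pvModel ps)).contains m with
        | false => rfl
        | true => exact absurd ((PySem.Dict.contains_iff_mem_keys _ _).mp hcc) hmemk
      unfold pvUpd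
      simp only [hcont]
      rw [if_pos trivial]
      rw [PySem.Dict.items_insert_of_not_contains _ _ hcont]
      show pvModel ps ++ [(m, v)] = pvModel (ps ++ [(m, v)])
      unfold pvModel
      have hded : PySem.List.dedup ((ps ++ [(m, v)]).map Prod.fst)
          = PySem.List.dedup (ps.map Prod.fst) ++ [m] := by
        rw [List.map_append, List.map_cons, List.map_nil, pvDedup_append, if_neg hm]
      rw [hded, List.map_append]
      congr 1
      · apply List.map_congr_left
        intro k hk
        have hk' : k ∈ ps.map Prod.fst := (PySem.List.mem_dedup _ _).mp hk
        have hne : (m, v).1 ≠ k := by intro hh; cases hh; exact hm hk'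
        rw [pvMx_append_ne k ps (m, v) hne]
      · simp only [List.map_cons, List.map_nil]
        rw [pvMx_append_self, if_neg hm]

theorem pvFilterMap_eq_flatMap {α β : Type} (q : α → Bool) (f : α → β) (l : List α) :
    (l.filter q).map f = l.flatMap (fun x => if q x then [f x] else []) := by
  induction l with
  | nil => simp
  | cons x t ih =>
    simp only [List.filter_cons, List.flatMap_cons]
    by_cases hx : q x = true
    · simp [hx, ih]
    · simp only [Bool.not_eq_true] at hx
      simp [hx, ih]

theorem pvRobot_pairs (m : String) (ms : List (String × Int)) (hnd : (ms.map Prod.fst).Nodup) :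
    (ms.filter (fun p => p.1 == m)).map Prod.snd
      = if (PySem.Dict.mk ms).contains m
        then [((PySem.Dict.mk ms).get? m).getD 0] else [] := by
  induction ms with
  | nil => simp [PySem.Dict.contains_eq_isSome_get?, PySem.Dict.get?]
  | cons p t ih =>
    obtain ⟨a, b⟩ := p
    rw [List.map_cons] at hnd
    have hnd' : (t.map Prod.fst).Nodup := (List.nodup_cons.mp hnd).2
    by_cases hp : (a == m) = true
    · have hpm : a = m := eq_of_beq hp
      have ht : t.filter (fun q => q.1 == m) = [] := by
        rw [List.filter_eq_nil_iff]
        intro q hq hqm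
        have hq1 : q.1 = m := eq_of_beq hqm
        have hmem : m ∈ t.map Prod.fst := hq1 ▸ List.mem_map.mpr ⟨q, hq, rfl⟩
        exact absurd hmem (hpm ▸ (List.nodup_cons.mp hnd).1)
      have hcont : (PySem.Dict.mk ((a, b) :: t)).contains m = true := by
        rw [PySem.Dict.contains_eq_isSome_get?, PySem.Dict.get?_mk_cons]
        simp [hp]
      simp [hp, ht, hcont, PySem.Dict.get?_mk_cons]
    · simp only [Bool.not_eq_true] at hp
      have hget : (PySem.Dict.mk ((a, b) :: t)).get? m = (PySem.Dict.mk t).get? m := by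
        rw [PySem.Dict.get?_mk_cons]; simp [hp]
      have hcont : (PySem.Dict.mk ((a, b) :: t)).contains m = (PySem.Dict.mk t).contains m := by
        rw [PySem.Dict.contains_eq_isSome_get?, PySem.Dict.contains_eq_isSome_get?, hget]
      have hfc : List.filter (fun q => q.1 == m) ((a, b) :: t) = List.filter (fun q => q.1 == m) t := by
        simp [hp]
      rw [hfc, ih hnd', hcont, hget]

theorem pvCands_flatMap (m : String) (l : List (String × List (String × Int))) :
    pvCands m (l.flatMap Prod.snd) = l.flatMap (fun rp => pvCands m rp.2) := by
  induction l with
  | nil => rfl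
  | cons rp t ih => rw [List.flatMap_cons, List.flatMap_cons, pvCands_append, ih]

theorem pvB_eq (blueprint : List (String × List (String × Int)))
    (h : Pre_calculateMaxMaterials blueprint) :
    calculateMaxMaterials_alt blueprint = pvModel (blueprint.flatMap Prod.snd) := by
  obtain ⟨h1, h2⟩ := h
  have hbp : ∀ rp ∈ blueprint, ((PySem.Dict.mk blueprint).get? rp.1).getD [] = rp.2 := by
    intro rp hrp
    have hg : (PySem.Dict.mk blueprint).get? rp.1 = some rp.2 := by
      apply PySem.Dict.get?_of_mem_items
      · simpa using hrp
      · exact h1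
    rw [hg]; rfl
  simp only [calculateMaxMaterials_alt]
  have e1 : blueprint.flatMap (fun rp => (((PySem.Dict.mk blueprint).get? rp.1).getD []).map Prod.fst)
      = blueprint.flatMap (fun rp => rp.2.map Prod.fst) :=
    List.flatMap_congr (fun rp hrp => by rw [hbp rp hrp])
  rw [e1, show blueprint.flatMap (fun rp => rp.2.map Prod.fst)
        = (blueprint.flatMap Prod.snd).map Prod.fst from List.map_flatMap.symm]
  unfold pvModel
  apply List.map_congr_left
  intro m hm
  have e2 : blueprint.filter (fun rp => (PySem.Dict.mk (((PySem.Dict.mk blueprint).get? rp.1).getD [])).contains m)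
      = blueprint.filter (fun rp => (PySem.Dict.mk rp.2).contains m) :=
    List.filter_congr (fun rp hrp => by rw [hbp rp hrp])
  rw [e2]
  have e3 : (blueprint.filter (fun rp => (PySem.Dict.mk rp.2).contains m)).map
        (fun rp => ((PySem.Dict.mk (((PySem.Dict.mk blueprint).get? rp.1).getD [])).get? m).getD 0)
      = (blueprint.filter (fun rp => (PySem.Dict.mk rp.2).contains m)).map
        (fun rp => ((PySem.Dict.mk rp.2).get? m).getD 0) :=
    List.map_congr_left (fun rp hrp => by rw [hbp rp (List.mem_filter.mp hrp).1])
  rw [e3]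
  have hc : (blueprint.filter (fun rp => (PySem.Dict.mk rp.2).contains m)).map
        (fun rp => ((PySem.Dict.mk rp.2).get? m).getD 0)
      = pvCands m (blueprint.flatMap Prod.snd) := by
    rw [pvCands_flatMap, pvFilterMap_eq_flatMap]
    apply List.flatMap_congr
    intro rp hrp
    show _ = pvCands m rp.2
    rw [show pvCands m rp.2 = (rp.2.filter (fun p => p.1 == m)).map Prod.snd from rfl,
      pvRobot_pairs m rp.2 (h2 rp hrp)]
  rw [hc]
  rfl

theorem pvA_eq (blueprint : List (String × List (String × Int)))
    (h : Pre_calculateMaxMaterials blueprint) :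
    calculateMaxMaterials blueprint
      = (List.foldl pvUpd PySem.Dict.empty (blueprint.flatMap Prod.snd)).items := by
  obtain ⟨h1, h2⟩ := h
  simp only [calculateMaxMaterials]
  rw [List.foldl_flatMap]
  congr 1
  apply PySem.List.foldl_congr_mem
  intro acc rp hrp
  have hget : (PySem.Dict.mk blueprint).get? rp.1 = some rp.2 := by
    apply PySem.Dict.get?_of_mem_items
    · simpa using hrp
    · simpa [PySem.Dict.keys_mk] using h1
  rw [hget]
  simp only [Option.getD_some]
  apply PySem.List.foldl_congr_mem
  intro acc2 mp hmp
  have hgv : (PySem.Dict.mk rp.2).get? mp.1 = some mp.2 := by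
    apply PySem.Dict.get?_of_mem_items
    · simpa using hmp
    · simpa [PySem.Dict.keys_mk] using h2 rp hrp
  rw [hgv]
  rfl

-- ===== VERDICT (by name: the statement is the Claim_ definition above) =====
theorem calculateMaxMaterials_spec : Claim_equal_calculateMaxMaterials := by
  intro blueprint _ hpre
  unfold Spec_calculateMaxMaterials
  rw [pvA_eq blueprint hpre, pvB_eq blueprint hpre, pvFold_eq_model]
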